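-- pv_equiv track=rewrite | github.com/xndadelin/decodr | pydecodr/ciphers/transposition/railfence.py | _zigzag_indices
-- ===== SOURCE A (Python) =====
-- def _zigzag_indices(n: int, rails: int) -> list[int]:
--     if rails < 2:
--         raise ValueError("rails must be >= 2")
--     rail = 0
--     direction = 1
--     rail_of_index: list[int] = []
--     for _ in range(n):
--         rail_of_index.append(rail)
--         rail += direction
--         if rail == rails - 1:
--             direction = -1
--         elif rail == 0:
--             direction = 1
--
--     indices: list[int] = []
--     for r in range(rails):
--         indices.extend(i for i, rr in enumerate(rail_of_index) if rr == r)
--     return indices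
-- ===== SOURCE B (Python) =====
-- def _zigzag_indices(n: int, rails: int) -> list[int]:
--     if rails < 2:
--         raise ValueError("rails must be >= 2")
--     period = 2 * (rails - 1)
--     buckets = [[] for _ in range(rails)]
--     for i in range(n):
--         r = i % period
--         buckets[r if r < rails else period - r].append(i)
--     return [i for bucket in buckets for i in bucket]
-- ===== Notes on version B (the rewrite author's own statement) =====
-- stated objective: faster
-- what changed: Replaces the zigzag simulation plus one full scan of all n indices per rail with a closed-form rail formula (i % period, folded) and a single pass that buckets indices by rail, then concatenates the buckets.
import Mathlib
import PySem

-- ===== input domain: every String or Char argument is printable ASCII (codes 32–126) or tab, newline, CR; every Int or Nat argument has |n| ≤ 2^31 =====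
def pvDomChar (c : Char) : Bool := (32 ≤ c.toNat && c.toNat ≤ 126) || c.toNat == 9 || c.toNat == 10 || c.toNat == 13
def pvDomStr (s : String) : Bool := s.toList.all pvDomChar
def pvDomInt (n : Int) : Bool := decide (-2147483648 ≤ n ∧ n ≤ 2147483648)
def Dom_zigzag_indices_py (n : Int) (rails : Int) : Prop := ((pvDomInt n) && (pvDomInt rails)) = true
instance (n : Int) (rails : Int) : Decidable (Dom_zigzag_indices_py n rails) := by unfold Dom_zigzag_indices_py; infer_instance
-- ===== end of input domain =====

-- B replaces A's zigzag simulation plus a full scan of all n indices per rail by a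
-- closed-form rail formula (i % period) and a single pass bucketing indices by rail
-- (objective: faster, O(rails*n) → O(n + rails)).

-- ===== PORT A =====
-- loop body of A's first for-loop (the zigzag simulation); state = (rail, direction, rail_of_index)
def zigzagStepA (rails : Int) (s : Int × Int × List Int) (_ : Int) : Int × Int × List Int :=
  let rail_of_index := s.2.2 ++ [s.1]
  let rail := s.1 + s.2.1
  let direction := if rail = rails - 1 then -1 else if rail = 0 then 1 else s.2.1
  (rail, direction, rail_of_index)

def zigzag_indices_py (n : Int) (rails : Int) : List Int :=
  if rails < 2 then []  -- Python: raise ValueError (these inputs are excluded by Pre_)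
  else
    let st := (PySem.List.pyRange 0 n).foldl (zigzagStepA rails) (0, 1, [])
    (PySem.List.pyRange 0 rails).foldl
      (fun indices r =>
        indices ++ ((PySem.List.enumerate st.2.2).filter (fun q => q.2 == r)).map (fun q => q.1))
      []

-- ===== PORT B =====
def zigzag_indices_py_alt (n : Int) (rails : Int) : List Int :=
  if rails < 2 then []  -- Python: raise ValueError (these inputs are excluded by Pre_)
  else
    let period := 2 * (rails - 1)
    let buckets0 : List (List Int) := (PySem.List.pyRange 0 rails).map (fun _ => [])
    let buckets := (PySem.List.pyRange 0 n).foldl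
      (fun bs i =>
        let r := PySem.Int.mod i period
        -- buckets[...].append(i); the bucket index is nonnegative, so .toNat is exact
        bs.modify (if r < rails then r else period - r).toNat (fun b => b ++ [i]))
      buckets0
    buckets.flatten

-- ===== PRECONDITION & SPEC =====
-- Pre_ excludes exactly rails < 2, where Python A raises ValueError("rails must be >= 2").
def Pre_zigzag_indices_py (n : Int) (rails : Int) : Prop := 2 ≤ rails
instance (n : Int) (rails : Int) : Decidable (Pre_zigzag_indices_py n rails) := by
  unfold Pre_zigzag_indices_py; infer_instance

def pvWitness_zigzag_indices_py : Int × Int := (7, 3)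

def Spec_zigzag_indices_py (n : Int) (rails : Int) (out : List Int) : Prop := out = zigzag_indices_py_alt n rails
instance (n : Int) (rails : Int) (out : List Int) : Decidable (Spec_zigzag_indices_py n rails out) := by unfold Spec_zigzag_indices_py; infer_instance

-- ===== CLAIM (what is proved, stated in full; the proofs are below) =====
def Claim_equal_zigzag_indices_py : Prop := ∀ (n : Int) (rails : Int), Dom_zigzag_indices_py n rails → Pre_zigzag_indices_py n rails → Spec_zigzag_indices_py n rails (zigzag_indices_py n rails)

-- ===== LEMMAS AND PROOFS =====

-- closed-form rail of index i for a given number of rails (proof-side helper)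
def pvF (rails r : Int) : Int := if r < rails then r else 2 * (rails - 1) - r
def pvKrail (rails i : Int) : Int := pvF rails (PySem.Int.mod i (2 * (rails - 1)))
def pvKdir (rails i : Int) : Int := if PySem.Int.mod i (2 * (rails - 1)) < rails - 1 then 1 else -1

lemma pv_mod_succ (rails i : Int) (h2 : 2 ≤ rails) (hi : 0 ≤ i) :
    (i + 1) % (2 * (rails - 1)) =
      if i % (2 * (rails - 1)) = 2 * (rails - 1) - 1 then 0 else i % (2 * (rails - 1)) + 1 := by
  have hp : (0:Int) < 2 * (rails - 1) := by omega
  have h1 : (i + 1) % (2 * (rails - 1)) = (i % (2 * (rails - 1)) + 1) % (2 * (rails - 1)) := by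
    have ho : (1:Int) % (2 * (rails - 1)) = 1 := Int.emod_eq_of_lt (by omega) (by omega)
    rw [Int.add_emod, ho]
  have hb1 : 0 ≤ i % (2 * (rails - 1)) := Int.emod_nonneg _ (by omega)
  have hb2 : i % (2 * (rails - 1)) < 2 * (rails - 1) := Int.emod_lt_of_pos _ hp
  rw [h1]
  split_ifs with h
  · rw [h]; simp
  · exact Int.emod_eq_of_lt (by omega) (by omega)

lemma pvKrail_bounds (rails i : Int) (h2 : 2 ≤ rails) :
    0 ≤ pvKrail rails i ∧ pvKrail rails i < rails := by
  have hp : (0:Int) < 2 * (rails - 1) := by omega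
  unfold pvKrail pvF
  rw [PySem.Int.mod_eq_emod_of_pos hp]
  have hb1 : 0 ≤ i % (2 * (rails - 1)) := Int.emod_nonneg _ (by omega)
  have hb2 : i % (2 * (rails - 1)) < 2 * (rails - 1) := Int.emod_lt_of_pos _ hp
  split_ifs <;> omega

lemma pvKrail_step (rails i : Int) (h2 : 2 ≤ rails) (hi : 0 ≤ i) :
    pvKrail rails (i + 1) = pvKrail rails i + pvKdir rails i ∧
    pvKdir rails (i + 1) =
      (if pvKrail rails (i + 1) = rails - 1 then -1
       else if pvKrail rails (i + 1) = 0 then 1 else pvKdir rails i) := by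
  have hp : (0:Int) < 2 * (rails - 1) := by omega
  have hb1 : 0 ≤ i % (2 * (rails - 1)) := Int.emod_nonneg _ (by omega)
  have hb2 : i % (2 * (rails - 1)) < 2 * (rails - 1) := Int.emod_lt_of_pos _ hp
  have hs := pv_mod_succ rails i h2 hi
  unfold pvKrail pvKdir pvF
  simp only [PySem.Int.mod_eq_emod_of_pos hp]
  rw [hs]
  constructor <;> (split_ifs <;> omega)

-- a fold whose body ignores the list element is an iterate of its length
lemma pv_foldl_ignore {σ : Type} (F : σ → Int → σ) (f : σ → σ) (hF : ∀ s x, F s x = f s) :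
    ∀ (l : List Int) (s : σ), l.foldl F s = f^[l.length] s := by
  intro l
  induction l with
  | nil => intro s; simp
  | cons x xs ih =>
      intro s
      simp only [List.foldl_cons, List.length_cons, Function.iterate_succ_apply, hF, ih]

lemma pv_simA (rails : Int) (h2 : 2 ≤ rails) (m : Nat) :
    (fun s => zigzagStepA rails s 0)^[m] (0, 1, ([] : List Int))
      = (pvKrail rails m, pvKdir rails m, (List.range m).map (fun (j : Nat) => pvKrail rails (j : Int))) := by
  induction m with
  | zero =>
      have hp : (0:Int) < 2 * (rails - 1) := by omega
      simp [pvKrail, pvKdir, pvF, PySem.Int.mod_eq_emod_of_pos hp]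
      omega
  | succ m ih =>
      rw [Function.iterate_succ_apply', ih]
      have hstep := pvKrail_step rails m h2 (by positivity)
      unfold zigzagStepA
      simp only [List.range_succ, List.map_append, List.map_cons, List.map_nil]
      have hc : ((m + 1 : Nat) : Int) = (m : Int) + 1 := by push_cast; ring
      rw [hc, hstep.2, hstep.1]

lemma pv_enum_map_range (g : Nat → Int) (N : Nat) :
    PySem.List.enumerate ((List.range N).map g) 0
      = (List.range N).map (fun (j : Nat) => ((j : Int), g j)) := by
  induction N with
  | zero => simp [PySem.List.enumerate_nil]
  | succ N ih =>
      rw [List.range_succ, List.map_append, List.map_append,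
        PySem.List.enumerate_append, ih]
      simp [PySem.List.enumerate_cons, PySem.List.enumerate]

lemma pv_foldl_modify_length (g : Int → Nat) :
    ∀ (xs : List Int) (bs : List (List Int)),
      (xs.foldl (fun bs i => bs.modify (g i) (fun b => b ++ [i])) bs).length = bs.length := by
  intro xs
  induction xs with
  | nil => intro bs; simp
  | cons x xs ih => intro bs; simp [List.foldl_cons, ih]

lemma pv_foldl_modify_getD (g : Int → Nat) :
    ∀ (xs : List Int) (bs : List (List Int)) (k : Nat), k < bs.length →
      (xs.foldl (fun bs i => bs.modify (g i) (fun b => b ++ [i])) bs).getD k []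
        = bs.getD k [] ++ xs.filter (fun i => g i == k) := by
  intro xs
  induction xs with
  | nil => intro bs k hk; simp
  | cons x xs ih =>
      intro bs k hk
      rw [List.foldl_cons, List.filter_cons,
        ih (bs.modify (g x) (fun b => b ++ [x])) k (by simpa using hk)]
      have h1 : (bs.modify (g x) (fun b => b ++ [x])).getD k []
          = if g x = k then bs.getD k [] ++ [x] else bs.getD k [] := by
        rw [List.getD_eq_getElem _ _ (by simpa using hk), List.getD_eq_getElem _ _ hk,
          List.getElem_modify]
      rw [h1]
      by_cases h : g x = k
      · simp [h, List.append_assoc]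
      · simp [h]

lemma pv_A_char (n rails : Int) (h2 : 2 ≤ rails) :
    zigzag_indices_py n rails
      = (List.range rails.toNat).flatMap
          (fun (k : Nat) => ((List.range n.toNat).filter
              (fun (j : Nat) => pvKrail rails (j : Int) == (k : Int))).map (fun (j : Nat) => (j : Int))) := by
  unfold zigzag_indices_py
  rw [if_neg (by omega)]
  have hfold := pv_foldl_ignore (zigzagStepA rails) (fun s => zigzagStepA rails s 0)
    (fun s x => rfl) (PySem.List.pyRange 0 n) (0, 1, [])
  have hlen : (PySem.List.pyRange 0 n).length = n.toNat := by
    rw [PySem.List.pyRange_one]; simp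
  rw [hfold, hlen, pv_simA rails h2 n.toNat,
    PySem.List.foldl_append_eq_flatMap, List.nil_append,
    pv_enum_map_range (fun (j : Nat) => pvKrail rails (j : Int)) n.toNat,
    PySem.List.pyRange_one]
  simp only [Int.sub_zero, List.flatMap_map, zero_add]
  congr 1
  funext k
  rw [List.filter_map, List.map_map]
  rfl

lemma pv_B_char (n rails : Int) (h2 : 2 ≤ rails) :
    zigzag_indices_py_alt n rails
      = (List.range rails.toNat).flatMap
          (fun (k : Nat) => ((List.range n.toNat).filter
              (fun (j : Nat) => pvKrail rails (j : Int) == (k : Int))).map (fun (j : Nat) => (j : Int))) := by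
  unfold zigzag_indices_py_alt
  rw [if_neg (by omega)]
  show ((PySem.List.pyRange 0 n).foldl
      (fun bs i => bs.modify ((fun i =>
          (if PySem.Int.mod i (2 * (rails - 1)) < rails
            then PySem.Int.mod i (2 * (rails - 1))
            else 2 * (rails - 1) - PySem.Int.mod i (2 * (rails - 1))).toNat) i)
        (fun b => b ++ [i]))
      ((PySem.List.pyRange 0 rails).map (fun _ => []))).flatten = _
  set g : Int → Nat := fun i =>
    (if PySem.Int.mod i (2 * (rails - 1)) < rails
      then PySem.Int.mod i (2 * (rails - 1))
      else 2 * (rails - 1) - PySem.Int.mod i (2 * (rails - 1))).toNat with hg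
  have hgk : ∀ i, g i = (pvKrail rails i).toNat := by
    intro i; rw [hg]; unfold pvKrail pvF; rfl
  have hb0len : ((PySem.List.pyRange 0 rails).map (fun _ => ([] : List Int))).length
      = rails.toNat := by
    rw [List.length_map, PySem.List.pyRange_one]; simp
  have hbuckets : ((PySem.List.pyRange 0 n).foldl
      (fun bs i => bs.modify (g i) (fun b => b ++ [i]))
      ((PySem.List.pyRange 0 rails).map (fun _ => [])))
      = (List.range rails.toNat).map
          (fun k => (PySem.List.pyRange 0 n).filter (fun i => g i == k)) := by
    apply List.ext_getElem
    · rw [pv_foldl_modify_length, hb0len, List.length_map, List.length_range]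
    · intro k hk hk'
      have hklt : k < rails.toNat := by
        simpa using hk'
      have h1 : ∀ (l : List (List Int)) (hx : k < l.length), l[k] = l.getD k [] := by
        intro l hx; rw [List.getD_eq_getElem _ _ hx]
      rw [h1 _ hk, h1 _ hk',
        pv_foldl_modify_getD g _ _ k (by rw [hb0len]; exact hklt)]
      have hb0 : ((PySem.List.pyRange 0 rails).map (fun _ => ([] : List Int))).getD k [] = [] := by
        rw [List.getD_eq_getElem _ _ (by rw [hb0len]; exact hklt)]
        simp
      rw [hb0, List.nil_append,
        List.getD_eq_getElem _ _ (by simpa using hk'), List.getElem_map, List.getElem_range]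
  rw [hbuckets, ← List.flatMap_def]
  congr 1
  funext k
  rw [PySem.List.pyRange_one]
  simp only [Int.sub_zero, List.filter_map, zero_add]
  congr 1
  apply List.filter_congr
  intro j hj
  have hb := pvKrail_bounds rails (j : Int) h2
  simp only [Function.comp_apply, hgk]
  rw [Bool.eq_iff_iff]
  simp only [beq_iff_eq]
  omega

-- ===== VERDICT (by name: the statement is the Claim_ definition above) =====
theorem zigzag_indices_py_spec : Claim_equal_zigzag_indices_py := by
  intro n rails _ hpre
  unfold Spec_zigzag_indices_py
  have h2 : 2 ≤ rails := hpre
  rw [pv_A_char n rails h2, pv_B_char n rails h2]
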